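-- pv_equiv track=rewrite | github.com/ClaudioCarvalhoo/you-can-accomplish-anything-with-just-enough-determination-and-a-little-bit-of-luck | problems/AE71.py | buildIP
-- ===== SOURCE A (Python) =====
-- def buildIP(string, dotPositions):
--     res = []
--     dots = set(dotPositions)
--     for i in range(len(string)):
--         res.append(string[i])
--         if i in dots:
--             res.append(".")
--     return "".join(res)
-- ===== SOURCE B (Python) =====
-- def buildIP(string, dotPositions):
--     valid = sorted(set(p for p in dotPositions if 0 <= p < len(string)))
--     parts = []
--     start = 0
--     for p in valid:
--         parts.append(string[start:p + 1])
--         start = p + 1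
--     parts.append(string[start:])
--     return ".".join(parts)
-- ===== Notes on version B (the rewrite author's own statement) =====
-- stated objective: faster
-- what changed: B filters/dedups/sorts the valid positions once and joins whole string slices with '.', instead of appending character by character with a per-index set-membership test.
import Mathlib
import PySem

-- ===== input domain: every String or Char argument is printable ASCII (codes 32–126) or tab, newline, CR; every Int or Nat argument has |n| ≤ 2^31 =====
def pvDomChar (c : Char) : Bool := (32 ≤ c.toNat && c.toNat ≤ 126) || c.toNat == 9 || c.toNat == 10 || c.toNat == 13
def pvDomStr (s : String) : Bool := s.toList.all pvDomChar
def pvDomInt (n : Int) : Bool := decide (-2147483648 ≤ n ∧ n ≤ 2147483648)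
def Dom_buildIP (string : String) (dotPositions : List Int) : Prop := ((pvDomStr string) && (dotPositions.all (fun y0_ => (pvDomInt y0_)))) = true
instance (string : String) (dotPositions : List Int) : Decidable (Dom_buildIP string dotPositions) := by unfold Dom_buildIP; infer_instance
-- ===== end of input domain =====

-- B sorts/dedups the valid dot positions once and joins whole string slices with "." instead of A's per-character loop with a membership test (measured constant-factor faster).
-- ===== PORT A =====
def buildIP (string : String) (dotPositions : List Int) : String :=
  let s := string.toList
  let dots := PySem.Set.ofList dotPositions
  let res := (PySem.List.pyRange 0 s.length).foldl
    (fun res i =>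
      let res := res ++ [PySem.List.pyGetD s i ' ']   -- string[i]: i ∈ range(len(s)), always in range
      if dots.contains i then res ++ ['.'] else res) []
  String.mk res

-- ===== PORT B =====
def buildIP_alt (string : String) (dotPositions : List Int) : String :=
  let s := string.toList
  let valid := PySem.List.sorted
    (PySem.Set.ofList (dotPositions.filter (fun p => decide (0 ≤ p) && decide (p < (s.length : Int)))))
    (fun p => p)
  let st := valid.foldl
    (fun (st : List (List Char) × Int) p =>
      (st.1 ++ [PySem.List.slice s (some st.2) (some (p + 1))], p + 1)) ([], 0)
  let parts := st.1 ++ [PySem.List.slice s (some st.2) none]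
  String.mk (PySem.Chars.join ['.'] parts)

-- ===== PRECONDITION & SPEC =====
def Spec_buildIP (string : String) (dotPositions : List Int) (out : String) : Prop := out = buildIP_alt string dotPositions
instance (string : String) (dotPositions : List Int) (out : String) : Decidable (Spec_buildIP string dotPositions out) := by unfold Spec_buildIP; infer_instance

-- ===== CLAIM (what is proved, stated in full; the proofs are below) =====
def Claim_equal_buildIP : Prop := ∀ (string : String) (dotPositions : List Int), Dom_buildIP string dotPositions → Spec_buildIP string dotPositions (buildIP string dotPositions)

-- ===== LEMMAS AND PROOFS =====

-- the chunk of output A produces for index i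
def chunk (s : List Char) (dots : PySem.Set Int) (i : Int) : List Char :=
  if dots.contains i then [PySem.List.pyGetD s i ' ', '.'] else [PySem.List.pyGetD s i ' ']

-- the list of parts B's loop builds, as a recursive function
def segs (s : List Char) : List Int → Int → List (List Char)
  | [], st => [PySem.List.slice s (some st) none]
  | p :: ps, st => PySem.List.slice s (some st) (some (p + 1)) :: segs s ps (p + 1)

lemma afold (s : List Char) (dots : PySem.Set Int) :
    ∀ (l : List Int) (acc : List Char),
      l.foldl (fun res i =>
        if dots.contains i = true then (res ++ [PySem.List.pyGetD s i ' ']) ++ ['.']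
        else res ++ [PySem.List.pyGetD s i ' ']) acc
      = acc ++ l.flatMap (chunk s dots) := by
  intro l
  induction l with
  | nil => intro acc; simp
  | cons p ps ih =>
      intro acc
      simp only [List.foldl_cons, List.flatMap_cons, ih, chunk]
      split_ifs <;> simp

lemma bfold (s : List Char) :
    ∀ (ps : List Int) (acc : List (List Char)) (st : Int),
      (ps.foldl (fun (st : List (List Char) × Int) p =>
          (st.1 ++ [PySem.List.slice s (some st.2) (some (p + 1))], p + 1)) (acc, st)).1
        ++ [PySem.List.slice s (some (ps.foldl (fun (st : List (List Char) × Int) p =>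
          (st.1 ++ [PySem.List.slice s (some st.2) (some (p + 1))], p + 1)) (acc, st)).2) none]
      = acc ++ segs s ps st := by
  intro ps
  induction ps with
  | nil => intro acc st; simp [segs]
  | cons p ps ih =>
      intro acc st
      simp only [List.foldl_cons, segs, ih]
      simp

lemma slice_eq_take_drop (s : List Char) (a b : Int) (ha : 0 ≤ a) (hb : 0 ≤ b) :
    PySem.List.slice s (some a) (some b) = List.take (b.toNat - a.toNat) (List.drop a.toNat s) := by
  have h := PySem.List.slice_natCast s a.toNat b.toNat
  rwa [Int.toNat_of_nonneg ha, Int.toNat_of_nonneg hb] at h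

lemma flat_drop (s : List Char) (dots : PySem.Set Int) :
    ∀ (k : Nat) (st : Int), 0 ≤ st → (s.length : Int) - st ≤ k →
      (∀ i, st ≤ i → i < (s.length : Int) → dots.contains i = false) →
      (PySem.List.pyRange st s.length).flatMap (chunk s dots) = s.drop st.toNat := by
  intro k
  induction k with
  | zero =>
      intro st h0 hk _
      rw [PySem.List.pyRange_one_eq_nil (by omega)]
      have h : s.length ≤ st.toNat := by omega
      simp [List.drop_eq_nil_of_le h]
  | succ k ih =>
      intro st h0 hk hc
      by_cases hlt : st < (s.length : Int)
      · rw [PySem.List.pyRange_one_cons hlt, List.flatMap_cons]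
        have hm0 : st ∉ dots := by simpa using hc st le_rfl hlt
        have hst : st.toNat < s.length := by omega
        have hk' : (s.length : Int) - (st + 1) ≤ (k : Int) := by
          push_cast at hk ⊢; omega
        rw [ih (st + 1) (by omega) hk' (fun i h1 h2 => hc i (by omega) h2)]
        rw [List.drop_eq_getElem_cons hst]
        have h3 : (st + 1).toNat = st.toNat + 1 := by omega
        simp [chunk, hm0, PySem.List.pyGetD_eq_getElem s ' ' h0 hlt, h3]
      · rw [PySem.List.pyRange_one_eq_nil (by omega)]
        have h : s.length ≤ st.toNat := by omega
        simp [List.drop_eq_nil_of_le h]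

lemma flat_mid (s : List Char) (dots : PySem.Set Int) (p : Int)
    (hp : 0 ≤ p) (hpn : p < (s.length : Int)) (hcp : dots.contains p = true) :
    ∀ (k : Nat) (st : Int), 0 ≤ st → st ≤ p → p - st ≤ k →
      (∀ i, st ≤ i → i < p → dots.contains i = false) →
      (PySem.List.pyRange st (p + 1)).flatMap (chunk s dots)
        = List.take ((p + 1).toNat - st.toNat) (List.drop st.toNat s) ++ ['.'] := by
  have hmp : p ∈ dots := by simpa using hcp
  intro k
  induction k with
  | zero =>
      intro st h0 hsp hk _
      have hsp' : st = p := by omega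
      subst hsp'
      rw [PySem.List.pyRange_one_cons (by omega), PySem.List.pyRange_one_eq_nil (by omega)]
      have hst : st.toNat < s.length := by omega
      rw [List.drop_eq_getElem_cons hst]
      have h1 : (st + 1).toNat - st.toNat = 1 := by omega
      simp [chunk, hmp, PySem.List.pyGetD_eq_getElem s ' ' h0 hpn, h1]
      rw [List.drop_eq_getElem_cons hst, List.take_succ_cons, List.take_zero]
      rfl
  | succ k ih =>
      intro st h0 hsp hk hc
      by_cases heq : st = p
      · subst heq
        rw [PySem.List.pyRange_one_cons (by omega), PySem.List.pyRange_one_eq_nil (by omega)]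
        have hst : st.toNat < s.length := by omega
        rw [List.drop_eq_getElem_cons hst]
        have h1 : (st + 1).toNat - st.toNat = 1 := by omega
        simp [chunk, hmp, PySem.List.pyGetD_eq_getElem s ' ' h0 hpn, h1]
        rw [List.drop_eq_getElem_cons hst, List.take_succ_cons, List.take_zero]
        rfl
      · have hlt : st < p := by omega
        rw [PySem.List.pyRange_one_cons (by omega), List.flatMap_cons]
        have hm0 : st ∉ dots := by simpa using hc st le_rfl hlt
        have hst : st.toNat < s.length := by omega
        have hk' : p - (st + 1) ≤ (k : Int) := by push_cast at hk ⊢; omega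
        rw [ih (st + 1) (by omega) (by omega) hk' (fun i h1 h2 => hc i (by omega) h2)]
        rw [List.drop_eq_getElem_cons hst]
        have h2 : (p + 1).toNat - st.toNat = ((p + 1).toNat - (st + 1).toNat) + 1 := by omega
        have h3 : (st + 1).toNat = st.toNat + 1 := by omega
        simp [chunk, hm0, PySem.List.pyGetD_eq_getElem s ' ' h0 (by omega : st < (s.length : Int)),
          h2, h3]
        rw [List.drop_eq_getElem_cons hst, List.take_succ_cons]
        simp

lemma join_segs_cons (s : List Char) (x : List Char) (ps : List Int) (st : Int) :
    PySem.Chars.join ['.'] (x :: segs s ps st)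
      = x ++ ['.'] ++ PySem.Chars.join ['.'] (segs s ps st) := by
  cases ps <;> simp [segs, PySem.Chars.join_cons_cons]

lemma main_lemma (s : List Char) (dots : PySem.Set Int) :
    ∀ (ps : List Int) (st : Int), 0 ≤ st →
      List.Pairwise (· < ·) ps →
      (∀ p ∈ ps, st ≤ p ∧ p < (s.length : Int)) →
      (∀ i, st ≤ i → i < (s.length : Int) → (dots.contains i = true ↔ i ∈ ps)) →
      PySem.Chars.join ['.'] (segs s ps st)
        = (PySem.List.pyRange st s.length).flatMap (chunk s dots) := by
  intro ps
  induction ps with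
  | nil =>
      intro st h0 _ _ hiff
      have hc : ∀ i, st ≤ i → i < (s.length : Int) → dots.contains i = false := by
        intro i h1 h2
        have h := hiff i h1 h2
        simp only [List.not_mem_nil, iff_false] at h
        rcases hb : dots.contains i with _ | _
        · rfl
        · exact absurd hb h
      rw [flat_drop s dots ((s.length : Int) - st).toNat st h0 (by omega) hc]
      simp [segs, PySem.Chars.join_singleton, PySem.List.slice_from s h0]
  | cons p ps ih =>
      intro st h0 hpw hbd hiff
      obtain ⟨hppps, hpw'⟩ := List.pairwise_cons.mp hpw
      obtain ⟨hstp, hpn⟩ := hbd p (List.mem_cons_self)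
      simp only [segs]
      rw [join_segs_cons]
      rw [PySem.List.pyRange_one_append st (p + 1) s.length (by omega) (by omega),
          List.flatMap_append]
      have hcp : dots.contains p = true :=
        (hiff p hstp hpn).mpr (List.mem_cons_self)
      have hlow : ∀ i, st ≤ i → i < p → dots.contains i = false := by
        intro i h1 h2
        rcases hb : dots.contains i with _ | _
        · rfl
        · exfalso
          have hm := (hiff i h1 (by omega)).mp hb
          rcases List.mem_cons.mp hm with h' | h'
          · omega
          · exact absurd (hppps i h') (by omega)
      have hmid := flat_mid s dots p (by omega) hpn hcp (p - st).toNat st h0 hstp (by omega) hlow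
      rw [hmid]
      rw [ih (p + 1) (by omega) hpw'
        (fun q hq => ⟨by have := hppps q hq; omega, (hbd q (List.mem_cons_of_mem p hq)).2⟩)
        (by
          intro i h1 h2
          rw [hiff i (by omega) h2, List.mem_cons]
          constructor
          · rintro (h' | h')
            · omega
            · exact h'
          · intro hm; exact Or.inr hm)]
      rw [slice_eq_take_drop s st (p + 1) h0 (by omega)]

def partsB (s : List Char) (valid : List Int) : List (List Char) :=
  (valid.foldl (fun (st : List (List Char) × Int) p =>
      (st.1 ++ [PySem.List.slice s (some st.2) (some (p + 1))], p + 1)) ([], 0)).1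
  ++ [PySem.List.slice s
      (some (valid.foldl (fun (st : List (List Char) × Int) p =>
        (st.1 ++ [PySem.List.slice s (some st.2) (some (p + 1))], p + 1)) ([], 0)).2) none]

lemma key_eq (s : List Char) (dps : List Int) :
    (PySem.List.pyRange 0 s.length).foldl (fun res i =>
        if (PySem.Set.ofList dps).contains i = true then (res ++ [PySem.List.pyGetD s i ' ']) ++ ['.']
        else res ++ [PySem.List.pyGetD s i ' ']) []
    = PySem.Chars.join ['.']
        (partsB s (PySem.List.sorted
            (PySem.Set.ofList (dps.filter (fun p => decide (0 ≤ p) && decide (p < (s.length : Int)))))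
            (fun p => p))) := by
  set dots := PySem.Set.ofList dps with hdots
  set flt := dps.filter (fun p => decide (0 ≤ p) && decide (p < (s.length : Int))) with hflt
  set valid := PySem.List.sorted (PySem.Set.ofList flt) (fun p => p) with hvalid
  rw [afold s dots (PySem.List.pyRange 0 s.length) []]
  unfold partsB
  rw [bfold s valid [] 0]
  simp only [List.nil_append]
  have hperm : valid.Perm (PySem.Set.ofList flt) := PySem.List.sorted_perm _ _ _
  have hmemv : ∀ i : Int, i ∈ valid ↔ (0 ≤ i ∧ i < (s.length : Int) ∧ i ∈ dps) := by
    intro i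
    rw [hperm.mem_iff, PySem.Set.mem_ofList, hflt, List.mem_filter]
    simp
    tauto
  have hnd : valid.Nodup := hperm.nodup_iff.mpr (PySem.Set.nodup_ofList flt)
  have hle : List.Pairwise (fun a b : Int => a ≤ b) valid := PySem.List.sorted_pairwise _ _
  have hlt : List.Pairwise (· < ·) valid :=
    (hle.and hnd).imp (fun h => lt_of_le_of_ne h.1 h.2)
  have hcontains : ∀ i : Int, dots.contains i = true ↔ i ∈ dps := by
    intro i; simp [hdots, PySem.Set.contains]
  rw [main_lemma s dots valid 0 le_rfl hlt
    (fun p hp => by have := (hmemv p).mp hp; exact ⟨this.1, this.2.1⟩)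
    (by
      intro i h1 h2
      rw [hcontains i, hmemv i]
      tauto)]

-- ===== VERDICT (by name: the statement is the Claim_ definition above) =====
theorem buildIP_spec : Claim_equal_buildIP := by
  intro string dotPositions _
  unfold Spec_buildIP
  exact congrArg String.mk (key_eq string.toList dotPositions)
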